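-- pv_equiv track=rewrite | github.com/ribalda/everybodycodes | 2025/6/step1_2_3.py | count_options
-- ===== SOURCE A (Python) =====
-- def count_options(letters):
--     mentors = dict()
--     options = dict()
--     for i, l in enumerate(letters):
--         if l.isupper():
--             mentors[l] = mentors.get(l, 0) + 1
--             continue
--         options[l] = options.get(l, 0) + mentors.get(l.upper(), 0)
--     return options
-- ===== SOURCE B (Python) =====
-- def _tally(letters, k):
--     u = k.upper()
--     m = 0
--     total = 0
--     for s in letters:
--         if s == u and s.isupper():
--             m += 1
--         elif s == k:
--             total += m
--     return total
--
--
-- def count_options(letters):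
--     options = {}
--     for l in letters:
--         if not l.isupper() and l not in options:
--             options[l] = _tally(letters, l)
--     return options
-- ===== Notes on version B (the rewrite author's own statement) =====
-- stated objective: alternative
-- what changed: A makes one pass keeping two running dicts (mentor counts and option totals); B instead collects the distinct non-uppercase strings in first-occurrence order and computes each key's total with an independent per-key counting scan of the list.
import Mathlib
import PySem

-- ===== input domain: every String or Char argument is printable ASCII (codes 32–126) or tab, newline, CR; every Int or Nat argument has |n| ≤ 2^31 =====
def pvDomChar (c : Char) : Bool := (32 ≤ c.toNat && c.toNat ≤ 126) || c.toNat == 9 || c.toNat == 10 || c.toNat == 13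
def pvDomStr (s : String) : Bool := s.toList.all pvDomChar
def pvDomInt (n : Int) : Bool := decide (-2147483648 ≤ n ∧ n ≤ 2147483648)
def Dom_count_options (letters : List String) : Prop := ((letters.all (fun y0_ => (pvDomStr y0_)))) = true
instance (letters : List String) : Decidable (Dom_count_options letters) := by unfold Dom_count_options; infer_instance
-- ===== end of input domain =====

-- B replaces A's single pass over two running dicts by a dedup pass over the keys with an
-- independent per-key counting scan (alternative decomposition, not faster).

-- ===== PORT A =====
-- s.isupper(): at least one cased character and no lowercase one; exact on the printable-ASCII
-- domain, where the cased characters are exactly the ASCII letters.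
def pyIsupper (s : String) : Bool :=
  s.toList.any PySem.Chars.isalpha && s.toList.all (fun c => !PySem.Chars.islower c)

-- loop body of A (the enumerate index i is unused in A and is dropped)
def stepA (st : PySem.Dict String Int × PySem.Dict String Int) (l : String) :
    PySem.Dict String Int × PySem.Dict String Int :=
  if pyIsupper l = true then
    (st.1.insert l (st.1.getD l 0 + 1), st.2)
  else
    (st.1, st.2.insert l (st.2.getD l 0 + st.1.getD (PySem.Str.upper l) 0))

def count_options (letters : List String) : List (String × Int) :=
  (letters.foldl stepA (PySem.Dict.empty, PySem.Dict.empty)).2.items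

-- ===== PORT B =====
-- loop body of _tally(letters, k); state = (m, total)
def stepT (k : String) (st : Int × Int) (s : String) : Int × Int :=
  if s = PySem.Str.upper k ∧ pyIsupper s = true then (st.1 + 1, st.2)
  else if s = k then (st.1, st.2 + st.1)
  else st

def tallyAlt (letters : List String) (k : String) : Int :=
  (letters.foldl (stepT k) (0, 0)).2

-- loop body of B's dedup pass
def stepB (letters : List String) (opts : PySem.Dict String Int) (l : String) :
    PySem.Dict String Int :=
  if pyIsupper l = false ∧ opts.contains l = false then
    opts.insert l (tallyAlt letters l)
  else opts

def count_options_alt (letters : List String) : List (String × Int) :=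
  (letters.foldl (stepB letters) PySem.Dict.empty).items

-- ===== PRECONDITION & SPEC =====
def Spec_count_options (letters : List String) (out : List (String × Int)) : Prop := out = count_options_alt letters
instance (letters : List String) (out : List (String × Int)) : Decidable (Spec_count_options letters out) := by unfold Spec_count_options; infer_instance

-- ===== CLAIM (what is proved, stated in full; the proofs are below) =====
def Claim_equal_count_options : Prop := ∀ (letters : List String), Dom_count_options letters → Spec_count_options letters (count_options letters)

-- ===== LEMMAS AND PROOFS =====

-- distinct non-uppercase strings of p, in first-occurrence order
def keysOf (p : List String) : List String :=
  PySem.Set.ofList (p.filter (fun s => !pyIsupper s))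

def mcnt (p : List String) (k : String) : Int :=
  (p.countP (fun s => s == PySem.Str.upper k && pyIsupper s) : Int)

lemma mem_keysOf {p : List String} {k : String} (h : k ∈ keysOf p) :
    pyIsupper k = false ∧ k ∈ p := by
  unfold keysOf at h
  rw [PySem.Set.mem_ofList] at h
  simp only [List.mem_filter, Bool.not_eq_eq_eq_not, Bool.not_true] at h
  exact ⟨h.2, h.1⟩

lemma keysOf_nodup (p : List String) : (keysOf p).Nodup := PySem.Set.nodup_ofList _

lemma ofList_snoc (xs : List String) (x : String) :
    PySem.Set.ofList (xs ++ [x]) = PySem.Set.add (PySem.Set.ofList xs) x := by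
  simp [PySem.Set.ofList, List.foldl_append]

lemma keysOf_snoc_upper {p : List String} {x : String} (h : pyIsupper x = true) :
    keysOf (p ++ [x]) = keysOf p := by
  unfold keysOf
  rw [List.filter_append]
  simp [h]

lemma keysOf_snoc_mem {p : List String} {x : String} (h : x ∈ keysOf p) :
    keysOf (p ++ [x]) = keysOf p := by
  have hu : pyIsupper x = false := (mem_keysOf h).1
  have hmem : x ∈ PySem.Set.ofList (p.filter (fun s => !pyIsupper s)) := h
  unfold keysOf
  rw [List.filter_append]
  simp only [List.filter_cons, List.filter_nil, hu, Bool.not_false, if_true]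
  rw [ofList_snoc]
  simp only [PySem.Set.add, PySem.Set.contains]
  rw [if_pos (List.contains_iff_mem.mpr hmem)]

lemma keysOf_snoc_new {p : List String} {x : String} (hu : pyIsupper x = false)
    (h : x ∉ keysOf p) : keysOf (p ++ [x]) = keysOf p ++ [x] := by
  have hmem : x ∉ PySem.Set.ofList (p.filter (fun s => !pyIsupper s)) := h
  unfold keysOf
  rw [List.filter_append]
  simp only [List.filter_cons, List.filter_nil, hu, Bool.not_false, if_true]
  rw [ofList_snoc]
  simp only [PySem.Set.add, PySem.Set.contains]
  rw [if_neg (fun hc => hmem (List.contains_iff_mem.mp hc))]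

lemma not_mem_of_not_mem_keysOf {p : List String} {x : String}
    (hu : pyIsupper x = false) (h : x ∉ keysOf p) : x ∉ p := by
  intro hx
  exact h (by
    unfold keysOf
    rw [PySem.Set.mem_ofList, List.mem_filter]
    exact ⟨hx, by simp [hu]⟩)

lemma tally_fst (k : String) (p : List String) (m t : Int) :
    (p.foldl (stepT k) (m, t)).1 = m + mcnt p k := by
  induction p generalizing m t with
  | nil => simp [mcnt]
  | cons x xs ih =>
    simp only [List.foldl_cons, mcnt, List.countP_cons]
    by_cases h1 : x = PySem.Str.upper k ∧ pyIsupper x = true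
    · rw [show stepT k (m, t) x = (m + 1, t) from by unfold stepT; rw [if_pos h1]]
      rw [ih]
      simp only [mcnt]
      have : (x == PySem.Str.upper k && pyIsupper x) = true := by
        obtain ⟨ha, hb⟩ := h1; subst ha; simp [hb]
      simp only [this, if_true]
      push_cast
      ring
    · have hc : (x == PySem.Str.upper k && pyIsupper x) = false := by
        by_contra hc
        simp only [Bool.not_eq_false, Bool.and_eq_true, beq_iff_eq] at hc
        exact h1 ⟨hc.1, hc.2⟩
      by_cases h2 : x = k
      · rw [show stepT k (m, t) x = (m, t + m) from by unfold stepT; rw [if_neg h1, if_pos h2], ih]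
        simp [mcnt, hc]
      · rw [show stepT k (m, t) x = (m, t) from by unfold stepT; rw [if_neg h1, if_neg h2], ih]
        simp [mcnt, hc]

lemma tally_snd_const (k : String) {p : List String} (h : ∀ s ∈ p, s ≠ k) (m t : Int) :
    (p.foldl (stepT k) (m, t)).2 = t := by
  induction p generalizing m t with
  | nil => rfl
  | cons x xs ih =>
    simp only [List.foldl_cons]
    have hx : x ≠ k := h x (List.mem_cons_self ..)
    by_cases h1 : x = PySem.Str.upper k ∧ pyIsupper x = true
    · rw [show stepT k (m, t) x = (m + 1, t) from by unfold stepT; rw [if_pos h1]]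
      exact ih (fun s hs => h s (List.mem_cons_of_mem _ hs)) _ _
    · rw [show stepT k (m, t) x = (m, t) from by unfold stepT; rw [if_neg h1, if_neg hx]]
      exact ih (fun s hs => h s (List.mem_cons_of_mem _ hs)) _ _

lemma tally_zero {p : List String} {k : String} (h : k ∉ p) : tallyAlt p k = 0 := by
  unfold tallyAlt
  exact tally_snd_const k (fun s hs he => h (he ▸ hs)) 0 0

lemma tally_snoc (p : List String) (x k : String) :
    tallyAlt (p ++ [x]) k =
      if x = PySem.Str.upper k ∧ pyIsupper x = true then tallyAlt p k
      else if x = k then tallyAlt p k + mcnt p k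
      else tallyAlt p k := by
  unfold tallyAlt
  rw [List.foldl_append]
  simp only [List.foldl_cons, List.foldl_nil]
  set st := List.foldl (stepT k) (0, 0) p with hst
  by_cases h1 : x = PySem.Str.upper k ∧ pyIsupper x = true
  · rw [show stepT k st x = (st.1 + 1, st.2) from by unfold stepT; rw [if_pos h1], if_pos h1]
  · rw [if_neg h1]
    by_cases h2 : x = k
    · rw [show stepT k st x = (st.1, st.2 + st.1) from by unfold stepT; rw [if_neg h1, if_pos h2], if_pos h2]
      have := tally_fst k p 0 0
      rw [← hst] at this
      simp only [zero_add] at this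
      rw [this]
    · rw [show stepT k st x = st from by unfold stepT; rw [if_neg h1, if_neg h2], if_neg h2]

lemma contains_mapDict (ks : List String) (f : String → Int) (k : String) :
    (PySem.Dict.mk (ks.map (fun a => (a, f a)))).contains k = decide (k ∈ ks) := by
  induction ks with
  | nil => simp [PySem.Dict.contains]
  | cons a as ih =>
    simp only [List.map_cons, PySem.Dict.contains, PySem.Dict.items, List.any_cons] at *
    by_cases he : a = k
    · subst he; simp
    · have hne : (a == k) = false := by simpa using he
      simp only [hne, Bool.false_or, ih, List.mem_cons]
      by_cases hk : k ∈ as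
      · simp [hk]
      · simp [hk, Ne.symm he]

lemma insert_fresh {d : PySem.Dict String Int} {k : String} (h : d.contains k = false) (v : Int) :
    (d.insert k v).items = d.items ++ [(k, v)] := by
  simp [PySem.Dict.insert, h]

lemma insert_mem_map {ks : List String} {k : String} (h : k ∈ ks) (f : String → Int) (v : Int) :
    (PySem.Dict.mk (ks.map (fun a => (a, f a)))).insert k v
      = PySem.Dict.mk (ks.map (fun a => (a, if a = k then v else f a))) := by
  have hc : (PySem.Dict.mk (ks.map (fun a => (a, f a)))).contains k = true := by
    rw [contains_mapDict]; simpa using h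
  simp only [PySem.Dict.insert, hc, if_true]
  congr 1
  simp only [PySem.Dict.items, List.map_map]
  apply List.map_congr_left
  intro a _
  by_cases he : a = k
  · subst he; simp
  · simp [he]

lemma getD_mapDict_mem {ks : List String} (hnd : ks.Nodup) {k : String} (h : k ∈ ks)
    (f : String → Int) (d0 : Int) :
    (PySem.Dict.mk (ks.map (fun a => (a, f a)))).getD k d0 = f k := by
  induction ks with
  | nil => cases h
  | cons a as ih =>
    simp only [List.map_cons]
    rw [PySem.Dict.getD, PySem.Dict.get?]
    simp only [PySem.Dict.items, List.find?_cons]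
    by_cases he : a = k
    · subst he; simp
    · have hk : k ∈ as := by
        rcases List.mem_cons.mp h with h' | h'
        · exact absurd h'.symm he
        · exact h'
      have heq : (a == k) = false := by simpa using he
      rw [heq]
      have := ih (List.Nodup.of_cons hnd) hk
      rw [PySem.Dict.getD, PySem.Dict.get?] at this
      simpa using this

lemma getD_mapDict_not_mem {ks : List String} {k : String} (h : k ∉ ks)
    (f : String → Int) (d0 : Int) :
    (PySem.Dict.mk (ks.map (fun a => (a, f a)))).getD k d0 = d0 := by
  rw [PySem.Dict.getD, PySem.Dict.get?]
  have : List.find? (fun p => p.1 == k) ((ks.map (fun a => (a, f a)))) = none := by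
    rw [List.find?_eq_none]
    intro p hp
    simp only [List.mem_map] at hp
    obtain ⟨a, ha, rfl⟩ := hp
    simp only [Bool.eq_false_iff, ne_eq, beq_iff_eq]
    intro he
    subst he
    exact h ha
  simp [PySem.Dict.items, this]

lemma tally_snoc_of_mem {p : List String} {l a : String} (hu : pyIsupper l = false)
    (ha : a ∈ keysOf p) (hne : a ≠ l) : tallyAlt (p ++ [l]) a = tallyAlt p a := by
  rw [tally_snoc]
  have h1 : ¬ (l = PySem.Str.upper a ∧ pyIsupper l = true) := by
    rintro ⟨-, h⟩; rw [hu] at h; cases h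
  rw [if_neg h1, if_neg (fun he => hne (he.symm))]

lemma tally_snoc_of_upper {p : List String} {l a : String} (hu : pyIsupper l = true)
    (ha : a ∈ keysOf p) : tallyAlt (p ++ [l]) a = tallyAlt p a := by
  rw [tally_snoc]
  by_cases h1 : l = PySem.Str.upper a ∧ pyIsupper l = true
  · rw [if_pos h1]
  · rw [if_neg h1, if_neg (by
      intro he
      subst he
      rw [(mem_keysOf ha).1] at hu
      cases hu)]

lemma men_step_upper {p : List String} {l : String} (hu : pyIsupper l = true)
    {men : PySem.Dict String Int}
    (h : ∀ u, men.getD u 0 = (p.countP (fun s => s == u && pyIsupper s) : Int)) :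
    ∀ u, (men.insert l (men.getD l 0 + 1)).getD u 0
      = ((p ++ [l]).countP (fun s => s == u && pyIsupper s) : Int) := by
  intro u
  rw [PySem.Dict.getD_insert, List.countP_append]
  simp only [List.countP_cons, List.countP_nil]
  by_cases he : u = l
  · subst he; rw [if_pos rfl, h u]; simp [hu]
  · rw [if_neg he, h u]
    have : (l == u && pyIsupper l) = false := by
      simp only [Bool.and_eq_false_iff, beq_eq_false_iff_ne, ne_eq]
      exact Or.inl (fun hlu => he (hlu.symm))
    simp [this]

lemma men_step_lower {p : List String} {l : String} (hu : pyIsupper l = false)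
    {men : PySem.Dict String Int}
    (h : ∀ u, men.getD u 0 = (p.countP (fun s => s == u && pyIsupper s) : Int)) :
    ∀ u, men.getD u 0 = ((p ++ [l]).countP (fun s => s == u && pyIsupper s) : Int) := by
  intro u
  rw [List.countP_append]
  simp only [List.countP_cons, List.countP_nil]
  have : (l == u && pyIsupper l) = false := by simp [hu]
  simp [this, h u]

lemma A_inv : ∀ (rest p : List String) (men : PySem.Dict String Int),
    (∀ u, men.getD u 0 = (p.countP (fun s => s == u && pyIsupper s) : Int)) →
    (rest.foldl stepA (men, PySem.Dict.mk ((keysOf p).map (fun k => (k, tallyAlt p k))))).2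
      = PySem.Dict.mk ((keysOf (p ++ rest)).map (fun k => (k, tallyAlt (p ++ rest) k))) := by
  intro rest
  induction rest with
  | nil => intro p men _; simp
  | cons l rest ih =>
    intro p men hmen
    rw [show p ++ l :: rest = (p ++ [l]) ++ rest from by simp]
    simp only [List.foldl_cons]
    by_cases hu : pyIsupper l = true
    · rw [show stepA (men, PySem.Dict.mk ((keysOf p).map (fun k => (k, tallyAlt p k)))) l
          = (men.insert l (men.getD l 0 + 1),
             PySem.Dict.mk ((keysOf p).map (fun k => (k, tallyAlt p k)))) from by
        unfold stepA; rw [if_pos hu]]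
      have hD : PySem.Dict.mk ((keysOf p).map (fun k => (k, tallyAlt p k)))
          = PySem.Dict.mk ((keysOf (p ++ [l])).map (fun k => (k, tallyAlt (p ++ [l]) k))) := by
        rw [keysOf_snoc_upper hu]
        congr 1
        apply List.map_congr_left
        intro a ha
        rw [tally_snoc_of_upper hu ha]
      rw [hD]
      exact ih (p ++ [l]) _ (men_step_upper hu hmen)
    · rw [Bool.not_eq_true] at hu
      set D := PySem.Dict.mk ((keysOf p).map (fun k => (k, tallyAlt p k))) with hDdef
      rw [show stepA (men, D) l = (men, D.insert l (D.getD l 0 + men.getD (PySem.Str.upper l) 0)) from by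
        unfold stepA; rw [if_neg (by rw [hu]; exact Bool.false_ne_true)]]
      have hM : men.getD (PySem.Str.upper l) 0 = mcnt p l := hmen (PySem.Str.upper l)
      by_cases hm : l ∈ keysOf p
      · have hgd : D.getD l 0 = tallyAlt p l := by
          rw [hDdef]; exact getD_mapDict_mem (keysOf_nodup p) hm _ _
        have hins : D.insert l (D.getD l 0 + men.getD (PySem.Str.upper l) 0)
            = PySem.Dict.mk ((keysOf (p ++ [l])).map (fun k => (k, tallyAlt (p ++ [l]) k))) := by
          rw [hgd, hM, hDdef, insert_mem_map hm]
          rw [keysOf_snoc_mem hm]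
          congr 1
          apply List.map_congr_left
          intro a ha
          by_cases he : a = l
          · subst he
            rw [if_pos rfl, tally_snoc]
            rw [if_neg (by rintro ⟨-, h⟩; rw [hu] at h; cases h), if_pos rfl]
          · rw [if_neg he, tally_snoc_of_mem hu ha he]
        rw [hins]
        exact ih (p ++ [l]) _ (men_step_lower hu hmen)
      · have hnp : l ∉ p := not_mem_of_not_mem_keysOf hu hm
        have hgd : D.getD l 0 = 0 := by
          rw [hDdef]; exact getD_mapDict_not_mem hm _ _
        have hc : D.contains l = false := by
          rw [hDdef, contains_mapDict]; simpa using hm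
        have hins : D.insert l (D.getD l 0 + men.getD (PySem.Str.upper l) 0)
            = PySem.Dict.mk ((keysOf (p ++ [l])).map (fun k => (k, tallyAlt (p ++ [l]) k))) := by
          apply PySem.Dict.ext
          rw [insert_fresh hc, hgd, hM, keysOf_snoc_new hu hm]
          simp only [PySem.Dict.items, List.map_append, List.map_cons, List.map_nil, hDdef]
          congr 1
          · apply List.map_congr_left
            intro a ha
            have hne : a ≠ l := fun he => hm (he ▸ ha)
            rw [tally_snoc_of_mem hu ha hne]
          · have : tallyAlt (p ++ [l]) l = 0 + mcnt p l := by
              rw [tally_snoc]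
              rw [if_neg (by rintro ⟨-, h⟩; rw [hu] at h; cases h), if_pos rfl, tally_zero hnp]
            rw [this]
        rw [hins]
        exact ih (p ++ [l]) _ (men_step_lower hu hmen)

lemma B_inv (letters : List String) : ∀ (rest p : List String),
    rest.foldl (stepB letters) (PySem.Dict.mk ((keysOf p).map (fun k => (k, tallyAlt letters k))))
      = PySem.Dict.mk ((keysOf (p ++ rest)).map (fun k => (k, tallyAlt letters k))) := by
  intro rest
  induction rest with
  | nil => intro p; simp
  | cons l rest ih =>
    intro p
    rw [show p ++ l :: rest = (p ++ [l]) ++ rest from by simp]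
    simp only [List.foldl_cons]
    set D := PySem.Dict.mk ((keysOf p).map (fun k => (k, tallyAlt letters k))) with hDdef
    by_cases hu : pyIsupper l = true
    · rw [show stepB letters D l = D from by
        unfold stepB; rw [if_neg (by rintro ⟨h, -⟩; rw [hu] at h; cases h)]]
      have h2 := ih (p ++ [l])
      rw [keysOf_snoc_upper hu] at h2
      rw [← hDdef] at h2
      exact h2
    · rw [Bool.not_eq_true] at hu
      by_cases hm : l ∈ keysOf p
      · have hc : D.contains l = true := by
          rw [hDdef, contains_mapDict]; simpa using hm
        rw [show stepB letters D l = D from by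
          unfold stepB; rw [if_neg (by rintro ⟨-, h⟩; rw [hc] at h; cases h)]]
        have h2 := ih (p ++ [l])
        rw [keysOf_snoc_mem hm] at h2
        rw [← hDdef] at h2
        exact h2
      · have hc : D.contains l = false := by
          rw [hDdef, contains_mapDict]; simpa using hm
        have hstep : stepB letters D l
            = PySem.Dict.mk ((keysOf (p ++ [l])).map (fun k => (k, tallyAlt letters k))) := by
          rw [show stepB letters D l = D.insert l (tallyAlt letters l) from by
            unfold stepB; rw [if_pos ⟨hu, hc⟩]]
          apply PySem.Dict.ext
          rw [insert_fresh hc, keysOf_snoc_new hu hm]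
          simp [hDdef, PySem.Dict.items]
        rw [hstep]
        exact ih (p ++ [l])

-- ===== VERDICT (by name: the statement is the Claim_ definition above) =====
theorem count_options_spec : Claim_equal_count_options := by
  intro letters _
  unfold Spec_count_options count_options count_options_alt
  have hA := A_inv letters [] PySem.Dict.empty (by intro u; simp [PySem.Dict.getD, PySem.Dict.get?, PySem.Dict.empty])
  have hB := B_inv letters letters []
  simp only [keysOf, List.filter_nil, List.map_nil, List.nil_append] at hA hB
  have he : (PySem.Dict.mk ([] : List (String × Int))) = PySem.Dict.empty := rfl
  rw [show PySem.Set.ofList ([] : List String) = [] from rfl] at hA hB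
  simp only [List.map_nil, he] at hA hB
  rw [hA, hB]
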